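-- pv_equiv track=rewrite | github.com/yuuun/algo | programmers/87390.py | solution
-- ===== SOURCE A (Python) =====
-- def solution(n, left, right):
--     xu, xd = left // n, left % n
--     right += 1
--     yu, yd = right // n, right % n
--     answer = []
--     # 1
--     if xu == yu:
--         for i in range(xd, yd):
--             if xu < i:
--                 answer.append(i + 1)
--             else:
--                 answer.append(xu + 1)
--         return answer
--     else:
--         for i in range(xd, n):
--             if xu < i:
--                 answer.append(i + 1)
--             else:
--                 answer.append(xu + 1)
--     # 2
--     for j in range(xu + 1, yu):
--         for i in range(n):
--             if j < i:
--                 answer.append(i + 1)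
--             else:
--                 answer.append(j + 1)
--     # 3
--     for i in range(yd):
--         if yu < i:
--             answer.append(i + 1)
--         else:
--             answer.append(yu + 1)
--     return answer
-- ===== SOURCE B (Python) =====
-- def solution(n, left, right):
--     # One flat pass over the global index k; cell value is max(row, col) + 1.
--     return [max(k // n, k % n) + 1 for k in range(left, right + 1)]
-- ===== Notes on version B (the rewrite author's own statement) =====
-- stated objective: simpler
-- what changed: Replaces A's three-region construction (partial first row, nested full middle rows loop, partial last row, each via conditional appends) with a single flat comprehension over the global index k computing max(k//n, k%n)+1.
-- outside the precondition, e.g. on solution(2, 0, -3): A returns [1, 2], B returns []; on solution(-4, -8, -6): A returns [], B returns [3, 2, 2]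
import Mathlib
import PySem

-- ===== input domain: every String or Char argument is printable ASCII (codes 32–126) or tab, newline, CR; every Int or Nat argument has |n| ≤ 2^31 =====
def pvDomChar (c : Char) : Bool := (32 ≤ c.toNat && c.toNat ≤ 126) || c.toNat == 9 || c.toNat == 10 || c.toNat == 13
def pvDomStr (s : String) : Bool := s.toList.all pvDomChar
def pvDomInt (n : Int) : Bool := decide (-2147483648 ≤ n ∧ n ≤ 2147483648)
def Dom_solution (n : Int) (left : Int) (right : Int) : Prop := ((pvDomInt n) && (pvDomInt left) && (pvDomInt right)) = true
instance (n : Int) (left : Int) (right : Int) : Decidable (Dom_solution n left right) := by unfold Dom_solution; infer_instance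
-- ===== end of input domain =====

-- B replaces A's three-region construction by one flat index pass; objective: simpler.

-- ===== PORT A =====
def solution (n : Int) (left : Int) (right : Int) : List Int :=
  let xu := PySem.Int.floordiv left n
  let xd := PySem.Int.mod left n
  let right := right + 1
  let yu := PySem.Int.floordiv right n
  let yd := PySem.Int.mod right n
  if xu == yu then
    (PySem.List.pyRange xd yd 1).foldl
      (fun answer i => answer ++ [if xu < i then i + 1 else xu + 1]) []
  else
    let answer :=
      (PySem.List.pyRange xd n 1).foldl
        (fun answer i => answer ++ [if xu < i then i + 1 else xu + 1]) []
    let answer :=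
      (PySem.List.pyRange (xu + 1) yu 1).foldl
        (fun answer j =>
          (PySem.List.pyRange 0 n 1).foldl
            (fun answer i => answer ++ [if j < i then i + 1 else j + 1]) answer)
        answer
    (PySem.List.pyRange 0 yd 1).foldl
      (fun answer i => answer ++ [if yu < i then i + 1 else yu + 1]) answer

-- ===== PORT B =====
def solution_alt (n : Int) (left : Int) (right : Int) : List Int :=
  (PySem.List.pyRange left (right + 1) 1).map
    (fun k => max (PySem.Int.floordiv k n) (PySem.Int.mod k n) + 1)

-- ===== PRECONDITION & SPEC =====
-- Pre_ excludes n = 0 (A raises ZeroDivisionError) and, with one plain sentence: it excludes the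
-- inputs where A's returned value is an accident of its three-region loop structure — for n < 0
-- with a non-empty index range spanning two "rows" A returns [] merely because range(xd, n) and
-- range(n) are empty for negative n, and for right < left - 1 (a backwards range) spanning two
-- rows A returns a leftover partial first row; B does the natural thing (the flat pass) there.
def Pre_solution (n : Int) (left : Int) (right : Int) : Prop :=
  n ≠ 0 ∧ (PySem.Int.floordiv left n = PySem.Int.floordiv (right + 1) n
    ∨ (1 ≤ n ∧ left ≤ right + 1) ∨ (n ≤ -1 ∧ right < left))
instance (n : Int) (left : Int) (right : Int) : Decidable (Pre_solution n left right) := by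
  unfold Pre_solution; infer_instance
def pvWitness_solution : Int × Int × Int := (3, 2, 5)

def Spec_solution (n : Int) (left : Int) (right : Int) (out : List Int) : Prop :=
  out = solution_alt n left right
instance (n : Int) (left : Int) (right : Int) (out : List Int) : Decidable (Spec_solution n left right out) := by
  unfold Spec_solution; infer_instance

-- ===== CLAIM (what is proved, stated in full; the proofs are below) =====
def Claim_equal_solution : Prop := ∀ (n : Int) (left : Int) (right : Int),
  Dom_solution n left right → Pre_solution n left right →
  Spec_solution n left right (solution n left right)

-- ===== LEMMAS AND PROOFS =====

-- the per-cell value B computes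
def pvCell (n k : Int) : Int := max (PySem.Int.floordiv k n) (PySem.Int.mod k n) + 1

-- shifting a unit range
theorem pyRange_one_shift (c a b : Int) :
    PySem.List.pyRange (c + a) (c + b) 1 = (PySem.List.pyRange a b 1).map (fun i => c + i) := by
  rw [PySem.List.pyRange_one, PySem.List.pyRange_one, List.map_map]
  rw [show c + b - (c + a) = b - a from by ring]
  apply List.map_congr_left
  intro k _
  simp only [Function.comp]
  ring

-- uniqueness of quotient and remainder, both signs of n
theorem fd_md (n q i : Int) (hn : n ≠ 0) (hi : (0 ≤ i ∧ i < n) ∨ (n < i ∧ i ≤ 0)) :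
    PySem.Int.floordiv (q * n + i) n = q ∧ PySem.Int.mod (q * n + i) n = i := by
  have h1 := PySem.Int.floordiv_mul_add_mod (q * n + i) n
  set q' := PySem.Int.floordiv (q * n + i) n with hq'
  set r' := PySem.Int.mod (q * n + i) n with hr'
  have hrb : (0 ≤ r' ∧ r' < n) ∨ (n < r' ∧ r' ≤ 0) := by
    rcases lt_or_gt_of_ne hn with h | h
    · exact Or.inr (PySem.Int.mod_neg_bounds _ h)
    · exact Or.inl ⟨PySem.Int.mod_nonneg _ h, PySem.Int.mod_lt _ h⟩
  have hd : (q' - q) * n = i - r' := by linear_combination h1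
  have hq : q' = q := by
    rcases lt_trichotomy q' q with h | h | h
    · exfalso; rcases hi with hi | hi <;> rcases hrb with hr | hr <;> nlinarith
    · exact h
    · exfalso; rcases hi with hi | hi <;> rcases hrb with hr | hr <;> nlinarith
  refine ⟨hq, ?_⟩
  rw [hq] at h1
  linarith

-- one row: the values A appends for columns a ≤ i < b of row j are B's values at k = j*n + i
theorem row_map (n j a b : Int) (hn : n ≠ 0)
    (hv : ∀ i, a ≤ i → i < b → (0 ≤ i ∧ i < n) ∨ (n < i ∧ i ≤ 0)) :
    (PySem.List.pyRange (j * n + a) (j * n + b) 1).map (pvCell n)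
      = (PySem.List.pyRange a b 1).map (fun i => if j < i then i + 1 else j + 1) := by
  rw [pyRange_one_shift, List.map_map]
  apply List.map_congr_left
  intro i hi
  rw [PySem.List.mem_pyRange_one] at hi
  obtain ⟨hfd, hmd⟩ := fd_md n j i hn (hv i hi.1 hi.2)
  simp only [Function.comp, pvCell, hfd, hmd]
  rcases lt_or_ge j i with h | h
  · rw [if_pos h, max_eq_right (le_of_lt h)]
  · rw [if_neg (not_lt.mpr h), max_eq_left h]

-- a full row (positive n), bounds written as row multiples
theorem full_row_map (n j : Int) (hn : 1 ≤ n) :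
    (PySem.List.pyRange (j * n) ((j + 1) * n) 1).map (pvCell n)
      = (PySem.List.pyRange 0 n 1).map (fun i => if j < i then i + 1 else j + 1) := by
  have h := row_map n j 0 n (by omega) (fun i h1 h2 => Or.inl ⟨h1, h2⟩)
  rw [add_zero] at h
  rw [show (j + 1) * n = j * n + n from by ring]
  exact h

-- the full middle block: rows s … t-1 (positive n)
theorem mid_block (n : Int) (hn : 1 ≤ n) (s t : Int) (hst : s ≤ t) :
    (PySem.List.pyRange (s * n) (t * n) 1).map (pvCell n)
      = (PySem.List.pyRange s t 1).flatMap
          (fun j => (PySem.List.pyRange 0 n 1).map (fun i => if j < i then i + 1 else j + 1)) := by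
  obtain ⟨d, hd⟩ : ∃ d : Nat, t = s + d := ⟨(t - s).toNat, by omega⟩
  subst hd
  induction d generalizing s with
  | zero => simp [PySem.List.pyRange_one_eq_nil (le_refl s), PySem.List.pyRange_one_eq_nil (le_refl (s*n))]
  | succ m ih =>
    have h1 : s ≤ s + 1 := by omega
    have h2 : (s : Int) + 1 ≤ s + (m + 1 : Nat) := by push_cast; omega
    have h1' : s * n ≤ (s + 1) * n := by nlinarith
    have h2' : (s + 1) * n ≤ (s + (m + 1 : Nat)) * n := by nlinarith
    rw [PySem.List.pyRange_one_append s (s + 1) (s + (m + 1 : Nat)) h1 h2,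
        PySem.List.pyRange_one_append (s * n) ((s + 1) * n) ((s + (m + 1 : Nat)) * n) h1' h2',
        List.map_append, List.flatMap_append]
    congr 1
    · rw [full_row_map n s hn, PySem.List.pyRange_one_singleton]
      simp
    · rw [show (s : Int) + (m + 1 : Nat) = (s + 1) + (m : Nat) from by push_cast; ring]
      exact ih (s + 1) (by omega)

theorem solution_eq_alt (n left right : Int) (h : Pre_solution n left right) :
    solution n left right = solution_alt n left right := by
  obtain ⟨hn, hC⟩ := h
  unfold solution solution_alt
  simp only []
  set xu := PySem.Int.floordiv left n with hxu
  set xd := PySem.Int.mod left n with hxd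
  set yu := PySem.Int.floordiv (right + 1) n with hyu
  set yd := PySem.Int.mod (right + 1) n with hyd
  have hL : xu * n + xd = left := PySem.Int.floordiv_mul_add_mod left n
  have hR : yu * n + yd = right + 1 := PySem.Int.floordiv_mul_add_mod (right + 1) n
  show (if (xu == yu) = true then _ else _) = (PySem.List.pyRange left (right + 1) 1).map
      (fun k => max (PySem.Int.floordiv k n) (PySem.Int.mod k n) + 1)
  rw [show (fun k => max (PySem.Int.floordiv k n) (PySem.Int.mod k n) + 1) = pvCell n from rfl]
  by_cases heq : xu = yu
  · -- same-row case: valid for either sign of n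
    rw [if_pos (by simp [heq])]
    have hmul : xu * n = yu * n := by rw [heq]
    have e1 : left = xu * n + xd := hL.symm
    have e2 : right + 1 = xu * n + yd := by omega
    have hv : ∀ i, xd ≤ i → i < yd → (0 ≤ i ∧ i < n) ∨ (n < i ∧ i ≤ 0) := by
      intro i h1 h2
      rcases lt_or_gt_of_ne hn with hneg | hpos
      · right
        have b1 := PySem.Int.mod_neg_bounds (a := left) hneg
        have b2 := PySem.Int.mod_neg_bounds (a := right + 1) hneg
        constructor <;> [omega; omega]
      · left
        have b1 := PySem.Int.mod_nonneg left hpos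
        have b2 := PySem.Int.mod_lt (right + 1) hpos
        constructor <;> [omega; omega]
    rw [e1, e2, row_map n xu xd yd hn hv,
        PySem.List.foldl_append_singleton_eq_map, List.nil_append]
  · rw [if_neg (by simp [heq])]
    rcases hC with hC | hC | hC
    · exact absurd hC heq
    · -- positive n, left ≤ right + 1, at least two rows
      obtain ⟨hn1, hlr⟩ := hC
      have hxd0 : 0 ≤ xd := PySem.Int.mod_nonneg _ (by omega)
      have hxdn : xd < n := PySem.Int.mod_lt _ (by omega)
      have hyd0 : 0 ≤ yd := PySem.Int.mod_nonneg _ (by omega)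
      have hydn : yd < n := PySem.Int.mod_lt _ (by omega)
      have hxuyu : xu ≤ yu := by
        by_contra hcon
        push Not at hcon
        nlinarith
      have hxuyu' : xu + 1 ≤ yu := by omega
      have b1 : left ≤ (xu + 1) * n := by nlinarith
      have b2 : (xu + 1) * n ≤ yu * n := by nlinarith
      have b3 : yu * n ≤ right + 1 := by nlinarith
      rw [PySem.List.pyRange_one_append left ((xu + 1) * n) (right + 1) b1 (le_trans b2 b3),
          PySem.List.pyRange_one_append ((xu + 1) * n) (yu * n) (right + 1) b2 b3,
          List.map_append, List.map_append]
      have r1 : (PySem.List.pyRange left ((xu + 1) * n) 1).map (pvCell n)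
          = (PySem.List.pyRange xd n 1).map (fun i => if xu < i then i + 1 else xu + 1) := by
        rw [show left = xu * n + xd from hL.symm, show (xu + 1) * n = xu * n + n from by ring]
        exact row_map n xu xd n (by omega) (fun i h1 h2 => Or.inl ⟨by omega, h2⟩)
      have r3 : (PySem.List.pyRange (yu * n) (right + 1) 1).map (pvCell n)
          = (PySem.List.pyRange 0 yd 1).map (fun i => if yu < i then i + 1 else yu + 1) := by
        have h := row_map n yu 0 yd (by omega) (fun i h1 h2 => Or.inl ⟨h1, by omega⟩)
        rw [add_zero] at h
        rw [show right + 1 = yu * n + yd from hR.symm]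
        exact h
      have r2 := mid_block n hn1 (xu + 1) yu hxuyu'
      simp only [PySem.List.foldl_append_singleton_eq_map, PySem.List.foldl_append_eq_flatMap,
        List.nil_append]
      rw [r1, r2, r3, List.append_assoc]
    · -- negative n, backwards range: both sides are []
      obtain ⟨hneg, hrl⟩ := hC
      have bx := PySem.Int.mod_neg_bounds (a := left) (show n < 0 by omega)
      have by' := PySem.Int.mod_neg_bounds (a := right + 1) (show n < 0 by omega)
      rw [PySem.List.pyRange_one_eq_nil (show right + 1 ≤ left by omega), List.map_nil,
          PySem.List.pyRange_one_eq_nil (show (n : Int) ≤ xd by omega), List.foldl_nil,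
          PySem.List.pyRange_one_eq_nil (show yd ≤ (0 : Int) by omega),
          PySem.List.pyRange_one_eq_nil (show (n : Int) ≤ 0 by omega)]
      simp

-- ===== VERDICT (by name: the statement is the Claim_ definition above) =====
theorem solution_spec : Claim_equal_solution := by
  intro n left right _ hpre
  unfold Spec_solution
  exact solution_eq_alt n left right hpre
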